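-- pv_equiv track=rewrite | github.com/VaclavHa/CodeAbbey | Problem_ID_13/main.py | wsd
-- ===== SOURCE A (Python) =====
-- def wsd(numbers):
--     results_nums = []
--     for each_list in numbers:
--         summa = 0
--         for index, digit in enumerate(each_list, start=1):
--             summa += index * digit
--         results_nums.append(summa)
--
--     return results_nums
-- ===== SOURCE B (Python) =====
-- def wsd(numbers):
--     results_nums = []
--     for each_list in numbers:
--         running = 0
--         total = 0
--         for d in reversed(each_list):
--             running += d
--             total += running
--         results_nums.append(total)
--     return results_nums
-- ===== Notes on version B (the rewrite author's own statement) =====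
-- stated objective: alternative
-- what changed: Replaces the index-times-digit multiplication under enumerate by a reverse traversal keeping a running suffix sum (total of all suffix sums equals the weighted sum), no index arithmetic at all.
import Mathlib
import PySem

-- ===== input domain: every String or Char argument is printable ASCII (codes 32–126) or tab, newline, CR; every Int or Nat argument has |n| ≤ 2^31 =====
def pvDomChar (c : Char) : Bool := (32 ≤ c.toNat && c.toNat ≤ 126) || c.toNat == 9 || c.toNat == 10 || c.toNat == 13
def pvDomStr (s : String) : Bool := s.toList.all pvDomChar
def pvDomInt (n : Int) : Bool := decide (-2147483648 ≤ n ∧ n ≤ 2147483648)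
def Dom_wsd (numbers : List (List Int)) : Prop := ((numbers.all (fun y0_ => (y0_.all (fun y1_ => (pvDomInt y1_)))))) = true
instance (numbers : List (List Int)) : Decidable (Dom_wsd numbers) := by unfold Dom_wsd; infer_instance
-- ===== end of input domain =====

-- ===== PORT A =====
def wsd (numbers : List (List Int)) : List Int :=
  numbers.foldl (fun results_nums each_list =>
    results_nums ++ [(PySem.List.enumerate each_list 1).foldl
      (fun summa p => summa + p.1 * p.2) 0]) []

-- ===== PORT B =====
-- B: reverse traversal with a running suffix sum; no index arithmetic (alternative decomposition).
def wsd_alt (numbers : List (List Int)) : List Int :=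
  numbers.foldl (fun results_nums each_list =>
    (results_nums ++
      [(each_list.reverse.foldl (fun (rt : Int × Int) d => (rt.1 + d, rt.2 + (rt.1 + d))) (0, 0)).2])) []

-- ===== PRECONDITION & SPEC =====
def Spec_wsd (numbers : List (List Int)) (out : List Int) : Prop := out = wsd_alt numbers
instance (numbers : List (List Int)) (out : List Int) : Decidable (Spec_wsd numbers out) := by unfold Spec_wsd; infer_instance

-- ===== CLAIM (what is proved, stated in full; the proofs are below) =====
def Claim_equal_wsd : Prop := ∀ (numbers : List (List Int)), Dom_wsd numbers → Spec_wsd numbers (wsd numbers)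

-- ===== LEMMAS AND PROOFS =====

-- weighted sum with weights s, s+1, ... from the front (A's inner loop value)
def pvF (l : List Int) (s : Int) : Int :=
  match l with
  | [] => 0
  | d :: l' => s * d + pvF l' (s + 1)

-- weighted sum with weights from the END (last weight 1): value governing B's suffix-sum loop
def pvS (l : List Int) : Int :=
  match l with
  | [] => 0
  | d :: l' => ((l'.length : Int) + 1) * d + pvS l'

theorem pvF_shift (l : List Int) (s : Int) : pvF l (s + 1) = pvF l s + l.sum := by
  induction l generalizing s with
  | nil => simp [pvF]
  | cons d l ih => simp [pvF, ih (s+1)]; ring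

theorem pvS_snoc (ys : List Int) (d : Int) : pvS (ys ++ [d]) = d + pvS ys + ys.sum := by
  induction ys with
  | nil => simp [pvS]
  | cons a ys ih => simp [pvS, ih]; push_cast; ring

theorem pvS_reverse (l : List Int) : pvS l.reverse = pvF l 1 := by
  induction l with
  | nil => rfl
  | cons d l ih =>
      have h1 := pvF_shift l 1
      norm_num at h1
      simp [pvF, pvS_snoc, ih, h1]
      ring

theorem enumsum (l : List Int) (s a : Int) :
    (PySem.List.enumerate l s).foldl (fun summa p => summa + p.1 * p.2) a = a + pvF l s := by
  induction l generalizing s a with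
  | nil => simp [PySem.List.enumerate_nil, pvF]
  | cons d l ih =>
      simp [PySem.List.enumerate_cons, pvF, ih (s+1) (a + s*d)]
      ring

theorem bfold (ys : List Int) (r t : Int) :
    ys.foldl (fun (rt : Int × Int) d => (rt.1 + d, rt.2 + (rt.1 + d))) (r, t)
      = (r + ys.sum, t + (ys.length : Int) * r + pvS ys) := by
  induction ys generalizing r t with
  | nil => simp [pvS]
  | cons d ys ih =>
      simp [List.foldl_cons, ih (r + d) (t + (r + d)), pvS]
      constructor
      · ring
      · push_cast; ring

theorem inner_eq (l : List Int) :
    (PySem.List.enumerate l 1).foldl (fun summa p => summa + p.1 * p.2) 0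
      = (l.reverse.foldl (fun (rt : Int × Int) d => (rt.1 + d, rt.2 + (rt.1 + d))) (0, 0)).2 := by
  rw [enumsum, bfold]
  simp [pvS_reverse]

theorem foldl_same (ns : List (List Int)) (acc : List Int) :
    ns.foldl (fun results_nums each_list =>
      results_nums ++ [(PySem.List.enumerate each_list 1).foldl
        (fun summa p => summa + p.1 * p.2) 0]) acc
      = ns.foldl (fun results_nums each_list =>
      (results_nums ++
        [(each_list.reverse.foldl (fun (rt : Int × Int) d => (rt.1 + d, rt.2 + (rt.1 + d))) (0, 0)).2])) acc := by
  induction ns generalizing acc with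
  | nil => rfl
  | cons l ns ih => rw [List.foldl_cons, List.foldl_cons, inner_eq l]; exact ih _

-- ===== VERDICT (by name: the statement is the Claim_ definition above) =====
theorem wsd_spec : Claim_equal_wsd := by
  intro numbers _
  unfold Spec_wsd wsd wsd_alt
  induction numbers with
  | nil => rfl
  | cons l ns ih =>
      rw [List.foldl_cons, List.foldl_cons, inner_eq l]
      exact foldl_same ns _
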